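-- pv_equiv track=rewrite | github.com/adampolak/first-fit | runs/results/gen_175/main.py | _omega_open
-- ===== SOURCE A (Python) =====
-- def _omega_open(intervals):
--     """
--     Compute omega (max number of intervals covering a single point) for open intervals
--     via sweep. Process right endpoints before left endpoints on ties.
--     """
--     events = []
--     for (l, r) in intervals:
--         if l < r:
--             events.append((l, +1))
--             events.append((r, -1))
--     # right (-1) before left (+1) at the same coordinate
--     events.sort(key=lambda e: (e[0], 0 if e[1] == -1 else 1))
--     cur = best = 0
--     for _, t in events:
--         cur += t
--         if cur > best:
--             best = cur
--     return best
-- ===== SOURCE B (Python) =====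
-- def _omega_open(intervals):
--     """Two-pointer sweep over separately sorted start and end coordinates.
--
--     Instead of building and sorting one event list, sort the starts and the
--     ends of the non-empty open intervals separately and merge them with two
--     pointers; an end that is <= the pending start closes first (open-interval
--     tie rule).  Once all starts are consumed the running count only decreases,
--     so the loop stops there.
--     """
--     starts = sorted(l for (l, r) in intervals if l < r)
--     ends = sorted(r for (l, r) in intervals if l < r)
--     cur = best = 0
--     i = j = 0
--     while i < len(starts):
--         if j < len(ends) and ends[j] <= starts[i]:
--             cur -= 1
--             j += 1
--         else:
--             cur += 1
--             if cur > best: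
--                 best = cur
--             i += 1
--     return best
-- ===== Notes on version B (the rewrite author's own statement) =====
-- stated objective: alternative
-- what changed: Replaces the build-tag-sort-one-event-list sweep by sorting the start and end coordinates separately and merging them with two pointers (ends close first on ties), stopping once all starts are consumed.
import Mathlib
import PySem

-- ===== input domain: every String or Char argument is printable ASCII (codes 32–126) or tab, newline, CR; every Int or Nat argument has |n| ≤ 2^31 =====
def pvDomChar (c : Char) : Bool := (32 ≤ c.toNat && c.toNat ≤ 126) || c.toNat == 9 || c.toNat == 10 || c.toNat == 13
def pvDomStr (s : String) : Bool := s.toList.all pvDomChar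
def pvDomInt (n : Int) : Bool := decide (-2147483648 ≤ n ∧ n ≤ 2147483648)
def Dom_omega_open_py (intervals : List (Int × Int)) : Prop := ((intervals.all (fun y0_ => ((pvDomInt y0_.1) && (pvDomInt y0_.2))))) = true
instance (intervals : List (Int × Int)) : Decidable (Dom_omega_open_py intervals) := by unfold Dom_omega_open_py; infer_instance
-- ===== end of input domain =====

-- B sorts the start and end coordinates separately and merges them with two pointers
-- instead of A's tag-sort-and-sweep over one event list; same return value, similar cost.

-- ===== PORT A =====
-- literal port of A: build the tagged event list, sort by (coordinate, -1 before +1), running-max sweep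
def omega_open_py (intervals : List (Int × Int)) : Int :=
  let events := intervals.foldl
    (fun ev p => if p.1 < p.2 then (ev ++ [(p.1, (1 : Int))]) ++ [(p.2, (-1 : Int))] else ev) []
  let events := PySem.List.sorted2 events (fun e => e.1) (fun e => if e.2 = -1 then (0 : Int) else 1)
  let cb := events.foldl
    (fun (cb : Int × Int) e =>
      let cur := cb.1 + e.2
      (cur, if cur > cb.2 then cur else cb.2)) ((0 : Int), (0 : Int))
  cb.2

-- ===== PORT B =====
-- the two-pointer while-loop of Source B: state (remaining starts, remaining ends, cur, best)
def bGo : List Int → List Int → Int → Int → Int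
  | [], _, _, best => best
  | _ :: ss, [], cur, best =>
      let cur' := cur + 1
      bGo ss [] cur' (if cur' > best then cur' else best)
  | s :: ss, e :: es, cur, best =>
      if e ≤ s then bGo (s :: ss) es (cur - 1) best
      else
        let cur' := cur + 1
        bGo ss (e :: es) cur' (if cur' > best then cur' else best)
  termination_by ss es => ss.length + es.length

def omega_open_py_alt (intervals : List (Int × Int)) : Int :=
  let kept := intervals.filter (fun p => p.1 < p.2)
  let starts := PySem.List.sorted (kept.map Prod.fst) (fun x => x)
  let ends := PySem.List.sorted (kept.map Prod.snd) (fun x => x)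
  bGo starts ends 0 0

-- ===== PRECONDITION & SPEC =====
def Spec_omega_open_py (intervals : List (Int × Int)) (out : Int) : Prop := out = omega_open_py_alt intervals
instance (intervals : List (Int × Int)) (out : Int) : Decidable (Spec_omega_open_py intervals out) := by unfold Spec_omega_open_py; infer_instance

-- ===== CLAIM (what is proved, stated in full; the proofs are below) =====
def Claim_equal_omega_open_py : Prop := ∀ (intervals : List (Int × Int)), Dom_omega_open_py intervals → Spec_omega_open_py intervals (omega_open_py intervals)

-- ===== LEMMAS AND PROOFS =====

-- the sort key of A's events, encoded into a single Int (ends before starts at equal coordinates)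
def evKey (e : Int × Int) : Int := 2 * e.1 + (if e.2 = -1 then 0 else 1)

-- the merged event sequence B walks through implicitly
def mergeEvents : List Int → List Int → List (Int × Int)
  | [], es => es.map (fun e => (e, (-1 : Int)))
  | s :: ss, [] => (s, (1 : Int)) :: mergeEvents ss []
  | s :: ss, e :: es =>
      if e ≤ s then (e, (-1 : Int)) :: mergeEvents (s :: ss) es
      else (s, (1 : Int)) :: mergeEvents ss (e :: es)
  termination_by ss es => ss.length + es.length

-- A's sweep step
def sweepStep (cb : Int × Int) (e : Int × Int) : Int × Int :=
  let cur := cb.1 + e.2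
  (cur, if cur > cb.2 then cur else cb.2)

theorem sweep_ends (es : List Int) (cur best : Int) (h : cur ≤ best) :
    List.foldl sweepStep (cur, best) (es.map (fun e => (e, (-1 : Int)))) = (cur - es.length, best) := by
  induction es generalizing cur with
  | nil => simp
  | cons e es ih =>
      simp only [List.map_cons, List.foldl_cons, sweepStep]
      rw [if_neg (by omega)]
      rw [ih (cur + -1) (by omega)]
      simp only [Prod.mk.injEq, List.length_cons]
      exact ⟨by push_cast; omega, trivial⟩

theorem bGo_eq_sweep (ss es : List Int) (cur best : Int) (h : cur ≤ best) :
    bGo ss es cur best = (List.foldl sweepStep (cur, best) (mergeEvents ss es)).2 := by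
  induction ss, es, cur, best using bGo.induct with
  | case1 es cur best =>
      rw [bGo, mergeEvents, sweep_ends es cur best h]
  | case2 s ss cur best cur' ih =>
      rw [bGo, mergeEvents]
      simp only [List.foldl_cons, sweepStep]
      exact ih (by simp only [dite_eq_ite]; split <;> omega)
  | case3 s ss e es cur best hle ih =>
      rw [bGo, mergeEvents, if_pos hle, if_pos hle]
      simp only [List.foldl_cons, sweepStep]
      rw [show (if cur + -1 > best then cur + -1 else best) = best from if_neg (by omega)]
      exact ih (by omega)
  | case4 s ss e es cur best hle cur' ih =>
      rw [bGo, mergeEvents, if_neg hle, if_neg hle]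
      simp only [List.foldl_cons, sweepStep]
      exact ih (by simp only [dite_eq_ite]; split <;> omega)

theorem mergeEvents_perm (ss es : List Int) :
    (mergeEvents ss es).Perm (ss.map (fun s => (s, (1 : Int))) ++ es.map (fun e => (e, (-1 : Int)))) := by
  induction ss, es using mergeEvents.induct with
  | case1 es => rw [mergeEvents]; simp
  | case2 s ss ih =>
      rw [mergeEvents]
      simpa using ih.cons (s, (1 : Int))
  | case3 s ss e es hle ih =>
      rw [mergeEvents, if_pos hle]
      exact (ih.cons (e, (-1 : Int))).trans List.perm_middle.symm
  | case4 s ss e es hle ih =>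
      rw [mergeEvents, if_neg hle]
      simpa using ih.cons (s, (1 : Int))

theorem mergeEvents_pairwise (ss es : List Int)
    (hs : ss.Pairwise (· ≤ ·)) (he : es.Pairwise (· ≤ ·)) :
    (mergeEvents ss es).Pairwise (fun a b => evKey a ≤ evKey b) := by
  induction ss, es using mergeEvents.induct with
  | case1 es =>
      rw [mergeEvents]
      exact he.map _ (fun hab => by simp only [evKey]; omega)
  | case2 s ss ih =>
      rw [mergeEvents]
      rw [List.pairwise_cons] at hs ⊢
      refine ⟨fun y hy => ?_, ih hs.2 he⟩
      have hy' := (mergeEvents_perm ss []).mem_iff.mp hy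
      simp only [List.map_nil, List.append_nil, List.mem_map] at hy'
      obtain ⟨x, hx, rfl⟩ := hy'
      have := hs.1 x hx
      simp only [evKey]; omega
  | case3 s ss e es hle ih =>
      rw [mergeEvents, if_pos hle]
      rw [List.pairwise_cons] at he ⊢
      refine ⟨fun y hy => ?_, ih hs he.2⟩
      have hy' := (mergeEvents_perm (s :: ss) es).mem_iff.mp hy
      rw [List.mem_append] at hy'
      rcases hy' with hy' | hy' <;> rw [List.mem_map] at hy' <;> obtain ⟨x, hx, rfl⟩ := hy'
      · have hsx : s ≤ x := by
          rcases List.mem_cons.mp hx with rfl | hx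
          · omega
          · exact (List.pairwise_cons.mp hs).1 x hx
        simp only [evKey]; omega
      · have := he.1 x hx
        simp only [evKey]; omega
  | case4 s ss e es hle ih =>
      rw [mergeEvents, if_neg hle]
      rw [List.pairwise_cons] at hs ⊢
      refine ⟨fun y hy => ?_, ih hs.2 he⟩
      have hy' := (mergeEvents_perm ss (e :: es)).mem_iff.mp hy
      rw [List.mem_append] at hy'
      rcases hy' with hy' | hy' <;> rw [List.mem_map] at hy' <;> obtain ⟨x, hx, rfl⟩ := hy'
      · have := hs.1 x hx
        simp only [evKey]; omega
      · have hex : e ≤ x := by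
          rcases List.mem_cons.mp hx with rfl | hx
          · omega
          · exact (List.pairwise_cons.mp he).1 x hx
        simp only [evKey]; omega

-- evKey is injective on ±1-tagged events, so key-sorted equal multisets give equal lists
theorem eq_of_mapKey_eq (l₁ : List (Int × Int)) : ∀ (l₂ : List (Int × Int)),
    (∀ e ∈ l₁, e.2 = 1 ∨ e.2 = -1) → (∀ e ∈ l₂, e.2 = 1 ∨ e.2 = -1) →
    l₁.map evKey = l₂.map evKey → l₁ = l₂ := by
  induction l₁ with
  | nil =>
      intro l₂ _ _ h
      cases l₂ with
      | nil => rfl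
      | cons b l₂ => simp at h
  | cons a l₁ ih =>
      intro l₂ h₁ h₂ h
      cases l₂ with
      | nil => simp at h
      | cons b l₂ =>
          simp only [List.map_cons, List.cons.injEq] at h
          have ta := h₁ a (List.mem_cons_self)
          have tb := h₂ b (List.mem_cons_self)
          have hab : a = b := by
            obtain ⟨a1, a2⟩ := a; obtain ⟨b1, b2⟩ := b
            simp only [evKey] at h ta tb
            rcases ta with ta | ta <;> rcases tb with tb | tb <;>
              simp only [ta, tb] at h ⊢ <;> simp_all <;> omega
          subst hab
          rw [ih l₂ (fun e he => h₁ e (List.mem_cons_of_mem _ he))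
              (fun e he => h₂ e (List.mem_cons_of_mem _ he)) h.2]

theorem events_sorted_eq_merge (l₁ l₂ : List (Int × Int))
    (p : l₁.Perm l₂)
    (s₁ : l₁.Pairwise (fun a b => evKey a ≤ evKey b))
    (s₂ : l₂.Pairwise (fun a b => evKey a ≤ evKey b))
    (t₁ : ∀ e ∈ l₁, e.2 = 1 ∨ e.2 = -1) (t₂ : ∀ e ∈ l₂, e.2 = 1 ∨ e.2 = -1) :
    l₁ = l₂ := by
  have hmap : l₁.map evKey = l₂.map evKey :=
    List.Perm.eq_of_pairwise (fun a b _ _ h1 h2 => le_antisymm h1 h2)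
      (List.pairwise_map.mpr s₁) (List.pairwise_map.mpr s₂) (p.map evKey)
  exact eq_of_mapKey_eq l₁ l₂ t₁ t₂ hmap

-- A's Python sort key '(e[0], 0 if e[1]==-1 else 1)' is the single-Int key evKey
theorem sorted2_eq_sorted_evKey (xs : List (Int × Int)) :
    PySem.List.sorted2 xs (fun e => e.1) (fun e => if e.2 = -1 then (0 : Int) else 1)
      = PySem.List.sorted xs evKey false := by
  have hB : (fun (a b : Int × Int) =>
        decide (a.1 < b.1) ||
          (!decide (b.1 < a.1) &&
            decide ((if a.2 = -1 then (0 : Int) else 1) < (if b.2 = -1 then (0 : Int) else 1))))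
      = (fun (a b : Int × Int) => decide (evKey a < evKey b)) := by
    funext a b
    rw [Bool.eq_iff_iff]
    by_cases h1 : a.2 = -1 <;> by_cases h2 : b.2 = -1 <;>
      simp [evKey, h1, h2] <;> omega
  simp only [PySem.List.sorted2, PySem.List.sorted, Bool.false_eq_true, if_false]
  rw [hB]

-- A's event-building loop, as a flatMap
theorem build_eq_flatMap (intervals : List (Int × Int)) :
    intervals.foldl
        (fun ev p => if p.1 < p.2 then (ev ++ [(p.1, (1 : Int))]) ++ [(p.2, (-1 : Int))] else ev) []
      = intervals.flatMap (fun p => if p.1 < p.2 then [(p.1, (1 : Int)), (p.2, (-1 : Int))] else []) := by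
  have hf : (fun (ev : List (Int × Int)) (p : Int × Int) =>
        if p.1 < p.2 then (ev ++ [(p.1, (1 : Int))]) ++ [(p.2, (-1 : Int))] else ev)
      = (fun ev p => ev ++ (if p.1 < p.2 then [(p.1, (1 : Int)), (p.2, (-1 : Int))] else [])) := by
    funext ev p
    split <;> simp
  rw [hf, PySem.List.foldl_append_eq_flatMap]
  simp

theorem flatMap_perm (l : List (Int × Int)) :
    (l.flatMap (fun p => if p.1 < p.2 then [(p.1, (1 : Int)), (p.2, (-1 : Int))] else [])).Perm
      ((l.filter (fun p => p.1 < p.2)).map (fun p => (p.1, (1 : Int))) ++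
        (l.filter (fun p => p.1 < p.2)).map (fun p => (p.2, (-1 : Int)))) := by
  induction l with
  | nil => simp
  | cons x l ih =>
      by_cases hc : x.1 < x.2
      · simp only [List.flatMap_cons, List.filter_cons, hc, decide_true, if_pos, List.map_cons]
        refine List.Perm.trans ?_ (List.Perm.cons _ List.perm_middle.symm)
        exact (ih.cons _).cons _
      · simp only [List.flatMap_cons, List.filter_cons, hc, decide_false]
        simpa using ih

theorem tags_flatMap (l : List (Int × Int)) :
    ∀ e ∈ l.flatMap (fun p => if p.1 < p.2 then [(p.1, (1 : Int)), (p.2, (-1 : Int))] else []),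
      e.2 = 1 ∨ e.2 = -1 := by
  intro e he
  rw [List.mem_flatMap] at he
  obtain ⟨x, _, he⟩ := he
  by_cases hc : x.1 < x.2 <;> simp [hc] at he
  rcases he with rfl | rfl <;> simp

theorem tags_merge (ss es : List Int) :
    ∀ e ∈ mergeEvents ss es, e.2 = 1 ∨ e.2 = -1 := by
  intro e he
  have := (mergeEvents_perm ss es).mem_iff.mp he
  rw [List.mem_append] at this
  rcases this with h | h <;> rw [List.mem_map] at h <;> obtain ⟨x, _, rfl⟩ := h <;> simp

-- ===== VERDICT (by name: the statement is the Claim_ definition above) =====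
theorem omega_open_py_spec : Claim_equal_omega_open_py := by
  intro intervals _
  show omega_open_py intervals = omega_open_py_alt intervals
  simp only [omega_open_py, omega_open_py_alt]
  set kept := intervals.filter (fun p => p.1 < p.2) with hkept
  set S := PySem.List.sorted (kept.map Prod.fst) (fun x => x) with hS
  set T := PySem.List.sorted (kept.map Prod.snd) (fun x => x) with hT
  rw [build_eq_flatMap, sorted2_eq_sorted_evKey]
  set E := intervals.flatMap (fun p => if p.1 < p.2 then [(p.1, (1 : Int)), (p.2, (-1 : Int))] else []) with hE
  have hperm : (PySem.List.sorted E evKey false).Perm (mergeEvents S T) := by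
    refine (PySem.List.sorted_perm E evKey false).trans ?_
    refine (flatMap_perm intervals).trans ?_
    refine List.Perm.trans ?_ (mergeEvents_perm S T).symm
    refine List.Perm.append ?_ ?_
    · have : (S.map (fun s => (s, (1 : Int)))).Perm ((kept.map Prod.fst).map (fun s => (s, (1 : Int)))) :=
        (PySem.List.sorted_perm _ _ _).map _
      refine List.Perm.trans ?_ this.symm
      rw [List.map_map]
      rfl
    · have : (T.map (fun e => (e, (-1 : Int)))).Perm ((kept.map Prod.snd).map (fun e => (e, (-1 : Int)))) :=
        (PySem.List.sorted_perm _ _ _).map _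
      refine List.Perm.trans ?_ this.symm
      rw [List.map_map]
      rfl
  have hmerge : PySem.List.sorted E evKey false = mergeEvents S T := by
    refine events_sorted_eq_merge _ _ hperm (PySem.List.sorted_pairwise E evKey)
      (mergeEvents_pairwise S T (PySem.List.sorted_pairwise _ _) (PySem.List.sorted_pairwise _ _)) ?_ (tags_merge S T)
    intro e he
    exact tags_flatMap intervals e ((PySem.List.mem_sorted _ _ _ _).mp he)
  rw [hmerge, bGo_eq_sweep S T 0 0 le_rfl]
  rfl
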